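-- pv_equiv track=rewrite | github.com/RX-0-95/arducam_pyhost | cam_result_process.py | get_total_detected_time
-- ===== SOURCE A (Python) =====
-- def get_total_detected_time(t_list,effective_threshold=1200):
--     _t_list = t_list.copy()
--     total_detect_time = 0
--     #total_time = _t_list
--     if _t_list:
--         prev_time = _t_list.pop(0)
--     else:
--         return total_detect_time
--
--     while len(_t_list) != 0:
--         cur_time = _t_list.pop(0)
--         if (prev_time+effective_threshold) < cur_time:
--             total_detect_time += effective_threshold
--         else:
--             total_detect_time += cur_time - prev_time
--         prev_time = cur_time
--     return total_detect_time
-- ===== SOURCE B (Python) =====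
-- def get_total_detected_time(t_list, effective_threshold=1200):
--     if not t_list:
--         return 0
--     span = t_list[-1] - t_list[0]
--     overflow = 0
--     for prev, cur in zip(t_list, t_list[1:]):
--         gap = cur - prev
--         if gap > effective_threshold:
--             overflow += gap - effective_threshold
--     return span - overflow
-- ===== Notes on version B (the rewrite author's own statement) =====
-- stated objective: faster
-- what changed: Uses the telescoping identity (sum of consecutive gaps = last - first): computes the total span once and subtracts only the over-threshold excess of each gap, instead of re-summing every capped gap in a pop-driven while loop.
import Mathlib
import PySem

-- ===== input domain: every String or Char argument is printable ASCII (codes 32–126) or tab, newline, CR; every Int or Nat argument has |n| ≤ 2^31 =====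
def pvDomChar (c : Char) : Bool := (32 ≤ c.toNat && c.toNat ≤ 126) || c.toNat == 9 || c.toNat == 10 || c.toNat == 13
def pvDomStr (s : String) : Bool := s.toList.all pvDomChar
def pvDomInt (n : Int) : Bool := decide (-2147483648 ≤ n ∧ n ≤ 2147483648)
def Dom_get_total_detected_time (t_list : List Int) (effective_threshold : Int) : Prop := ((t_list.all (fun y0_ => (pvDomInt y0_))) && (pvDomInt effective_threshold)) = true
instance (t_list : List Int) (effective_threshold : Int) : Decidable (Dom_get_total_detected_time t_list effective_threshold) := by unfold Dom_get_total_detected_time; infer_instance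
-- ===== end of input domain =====

-- B replaces A's pop-driven capped-gap summation by the telescoping identity:
-- total = (last - first) minus the over-threshold excess of each gap (alternative decomposition).

-- ===== PORT A =====
-- A's while loop over the mutable copy: state = (total_detect_time, prev_time), consuming one element per step.
def get_total_detected_time (t_list : List Int) (effective_threshold : Int) : Int :=
  match t_list with
  | [] => 0
  | p :: rest =>
    (rest.foldl (fun (s : Int × Int) cur_time =>
        (if s.2 + effective_threshold < cur_time then s.1 + effective_threshold
         else s.1 + (cur_time - s.2), cur_time)) (0, p)).1

-- ===== PORT B =====
-- overflow loop of Source B over zip(t_list, t_list[1:])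
def pvOverflow (effective_threshold : Int) : List (Int × Int) → Int
  | [] => 0
  | (prev, cur) :: ps =>
    (if cur - prev > effective_threshold then (cur - prev) - effective_threshold else 0)
      + pvOverflow effective_threshold ps

def get_total_detected_time_alt (t_list : List Int) (effective_threshold : Int) : Int :=
  match t_list with
  | [] => 0
  | x :: rest =>
    (rest.getLastD x - x) - pvOverflow effective_threshold ((x :: rest).zip rest)

-- ===== PRECONDITION & SPEC =====
def Spec_get_total_detected_time (t_list : List Int) (effective_threshold : Int) (out : Int) : Prop := out = get_total_detected_time_alt t_list effective_threshold
instance (t_list : List Int) (effective_threshold : Int) (out : Int) : Decidable (Spec_get_total_detected_time t_list effective_threshold out) := by unfold Spec_get_total_detected_time; infer_instance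

-- ===== CLAIM (what is proved, stated in full; the proofs are below) =====
def Claim_equal_get_total_detected_time : Prop := ∀ (t_list : List Int) (effective_threshold : Int), Dom_get_total_detected_time t_list effective_threshold → Spec_get_total_detected_time t_list effective_threshold (get_total_detected_time t_list effective_threshold)

-- ===== LEMMAS AND PROOFS =====
theorem pv_fold_eq (th : Int) (rest : List Int) : ∀ (p acc : Int),
    (rest.foldl (fun (s : Int × Int) cur_time =>
        (if s.2 + th < cur_time then s.1 + th
         else s.1 + (cur_time - s.2), cur_time)) (acc, p)).1
      = acc + (rest.getLastD p - p) - pvOverflow th ((p :: rest).zip rest) := by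
  induction rest with
  | nil => intro p acc; simp [pvOverflow]
  | cons c rs ih =>
    intro p acc
    simp only [List.foldl_cons, List.zip_cons_cons, pvOverflow, List.getLastD_cons]
    rw [ih c]
    by_cases h : p + th < c
    · simp only [if_pos h, if_pos (by omega : c - p > th)]
      omega
    · simp only [if_neg h, if_neg (by omega : ¬ c - p > th)]
      omega

theorem get_total_detected_time_spec : Claim_equal_get_total_detected_time := by
  intro t_list th _
  unfold Spec_get_total_detected_time get_total_detected_time get_total_detected_time_alt
  cases t_list with
  | nil => rfl
  | cons p rest =>
    simp only []
    rw [pv_fold_eq th rest p 0]; omega
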